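-- pv_equiv track=rewrite | github.com/NotSimpleCode/simulacion | pruebas/model/poker_test.py | only_three_of_a_kind
-- ===== SOURCE A (Python) =====
-- def only_three_of_a_kind(numstr):
--     """Comprueba si hay solo una tercia en el número dado."""
--     count = {}
--     for char in numstr:
--         if char in count:
--             count[char] += 1
--         else:
--             count[char] = 1
--
--     num_triples = sum(1 for freq in count.values() if freq == 3)
--
--     return num_triples == 1
-- ===== SOURCE B (Python) =====
-- def only_three_of_a_kind(numstr):
--     """Sort the characters, then scan consecutive runs; exactly one run of length 3?"""
--     s = sorted(numstr)
--     n = len(s)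
--     triples = 0
--     i = 0
--     while i < n:
--         j = i + 1
--         while j < n and s[j] == s[i]:
--             j += 1
--         if j - i == 3:
--             triples += 1
--         i = j
--     return triples == 1
-- ===== Notes on version B (the rewrite author's own statement) =====
-- stated objective: alternative
-- what changed: Replaces the hash-map frequency count with sort-then-scan: B sorts the characters and counts consecutive runs of length exactly 3.
import Mathlib
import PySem

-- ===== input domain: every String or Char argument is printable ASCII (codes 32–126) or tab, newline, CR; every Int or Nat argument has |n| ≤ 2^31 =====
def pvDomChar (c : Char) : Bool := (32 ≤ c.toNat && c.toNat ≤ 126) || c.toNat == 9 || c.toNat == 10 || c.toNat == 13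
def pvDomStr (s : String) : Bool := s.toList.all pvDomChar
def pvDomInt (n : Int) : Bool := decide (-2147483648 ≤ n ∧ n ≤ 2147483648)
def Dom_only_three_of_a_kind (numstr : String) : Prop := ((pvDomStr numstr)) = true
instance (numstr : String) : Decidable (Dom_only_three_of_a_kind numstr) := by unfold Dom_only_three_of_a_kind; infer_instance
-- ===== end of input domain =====

-- B replaces A's hash-map frequency counting with sort-then-scan over runs (alternative decomposition, same result).

-- ===== PORT A =====
def only_three_of_a_kind (numstr : String) : Bool :=
  let count := numstr.toList.foldl
    (fun d ch => if d.contains ch then d.modify ch 0 (· + 1) else d.insert ch (1 : Int))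
    PySem.Dict.empty
  let num_triples := count.values.foldl
    (fun acc freq => acc + (if freq == (3 : Int) then (1 : Int) else 0)) 0
  num_triples == 1

-- ===== PORT B =====
-- the outer while loop of Source B: each step consumes one run of equal chars (inner while = takeWhile/dropWhile)
def pvCountRuns : List Char → Int
  | [] => 0
  | c :: rest =>
    (if (rest.takeWhile (fun x => x == c)).length + 1 == 3 then (1 : Int) else 0)
      + pvCountRuns (rest.dropWhile (fun x => x == c))
termination_by s => s.length
decreasing_by
  simpa using Nat.lt_succ_of_le (List.length_dropWhile_le _ _)

def only_three_of_a_kind_alt (numstr : String) : Bool :=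
  pvCountRuns (PySem.List.sorted numstr.toList (fun x => x) false) == 1

-- ===== PRECONDITION & SPEC =====
def Spec_only_three_of_a_kind (numstr : String) (out : Bool) : Prop := out = only_three_of_a_kind_alt numstr
instance (numstr : String) (out : Bool) : Decidable (Spec_only_three_of_a_kind numstr out) := by unfold Spec_only_three_of_a_kind; infer_instance

-- ===== CLAIM (what is proved, stated in full; the proofs are below) =====
def Claim_equal_only_three_of_a_kind : Prop := ∀ (numstr : String), Dom_only_three_of_a_kind numstr → Spec_only_three_of_a_kind numstr (only_three_of_a_kind numstr)

-- ===== LEMMAS AND PROOFS =====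

-- A's branching dict update is exactly Counter's update step
lemma pv_step_eq (d : PySem.Dict Char Int) (ch : Char) :
    (if d.contains ch then d.modify ch 0 (· + 1) else d.insert ch (1 : Int))
      = d.modify ch 0 (· + 1) := by
  by_cases h : d.contains ch
  · simp [h]
  · have h2 : d.get? ch = none := by
      rw [PySem.Dict.get?_eq_none_iff_contains]; simp [h]
    simp [PySem.Dict.modify, PySem.Dict.insert, PySem.Dict.getD, h, h2]

lemma pv_dict_eq (l : List Char) :
    l.foldl (fun d ch => if d.contains ch then d.modify ch 0 (· + 1) else d.insert ch (1 : Int))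
      PySem.Dict.empty = PySem.Dict.counter l := by
  rw [PySem.Dict.counter_eq_foldl]
  exact PySem.List.foldl_congr_mem l _ _ _ (fun d x _ => pv_step_eq d x)

lemma pv_foldl_count (xs : List Int) (acc : Int) :
    xs.foldl (fun a f => a + (if f == (3 : Int) then (1 : Int) else 0)) acc
      = acc + (xs.countP (fun f => f == 3) : Int) := by
  induction xs generalizing acc with
  | nil => simp
  | cons x xs ih =>
    simp only [List.foldl_cons, List.countP_cons, ih]
    by_cases h : x = 3
    · simp [h]; ring
    · simp [h]

-- A returns: number of distinct chars with count 3 equals 1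
lemma pv_A_char (l : List Char) :
    (l.foldl (fun d ch => if d.contains ch then d.modify ch 0 (· + 1) else d.insert ch (1 : Int))
        PySem.Dict.empty).values.foldl
      (fun acc freq => acc + (if freq == (3 : Int) then (1 : Int) else 0)) 0
    = ((PySem.Set.ofList l).countP (fun k => l.count k == 3) : Int) := by
  rw [pv_dict_eq, pv_foldl_count]
  have hv : (PySem.Dict.counter l).values
      = (PySem.Set.ofList l).map (fun k => (l.count k : Int)) := by
    simp only [PySem.Dict.values, PySem.Dict.items_counter, List.map_map]
    rfl
  rw [hv, List.countP_map]
  have : ∀ k ∈ PySem.Set.ofList l,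
      (((fun f => f == (3:Int)) ∘ (fun k => (l.count k : Int))) k = true
        ↔ (l.count k == 3) = true) := by
    intro k _
    simp [Function.comp]
    omega
  rw [List.countP_congr this]
  ring

-- after dropping the leading run of c from a sorted tail, c does not occur again
lemma pv_not_mem_drop (c : Char) (rest : List Char) (hcle : ∀ x ∈ rest, c ≤ x)
    (hp : rest.Pairwise (fun a b => a ≤ b)) : c ∉ rest.dropWhile (fun x => x == c) := by
  intro hc
  cases hR : rest.dropWhile (fun x => x == c) with
  | nil => rw [hR] at hc; simp at hc
  | cons y r' =>
    have hy : (y == c) = false := by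
      have := List.head_dropWhile_not (fun x => x == c) (l := rest) (by simp [hR])
      simpa [hR] using this
    have hyne : y ≠ c := by simpa using hy
    have hsub : ∀ x ∈ y :: r', x ∈ rest := by
      intro x hx; rw [← hR] at hx; exact (List.dropWhile_sublist _).mem hx
    have hpair : (y :: r').Pairwise (fun a b => a ≤ b) := by
      rw [← hR]; exact hp.sublist (List.dropWhile_sublist _)
    rw [hR] at hc
    rcases List.mem_cons.mp hc with h1 | h1
    · exact hyne h1.symm
    · have h2 : y ≤ c := (List.pairwise_cons.mp hpair).1 c h1
      have h3 : c ≤ y := hcle y (hsub y (by simp))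
      exact hyne (le_antisymm h2 h3)

-- on a sorted list, runs of length 3 are exactly the distinct chars with count 3
lemma pv_runs_char (s : List Char) (hs : s.Pairwise (fun a b => a ≤ b)) :
    pvCountRuns s = ((PySem.Set.ofList s).countP (fun k => s.count k == 3) : Int) := by
  induction s using pvCountRuns.induct with
  | case1 => simp [pvCountRuns]
  | case2 c rest ih =>
    have hpw := hs
    rw [List.pairwise_cons] at hpw
    obtain ⟨hcle, hrest⟩ := hpw
    set t := rest.takeWhile (fun x => x == c) with ht
    set r := rest.dropWhile (fun x => x == c) with hr
    have htr : t ++ r = rest := List.takeWhile_append_dropWhile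
    have hallt : ∀ x ∈ t, x = c := by
      intro x hx
      simpa using List.mem_takeWhile_imp hx
    have hrpair : r.Pairwise (fun a b => a ≤ b) :=
      hrest.sublist (List.dropWhile_sublist _)
    have hrsub : ∀ x ∈ r, x ∈ rest := fun x hx => (List.dropWhile_sublist _).mem hx
    have hcr : c ∉ r := by
      rw [hr]; exact pv_not_mem_drop c rest hcle hrest
    -- counts
    have hcountc : (c :: rest).count c = t.length + 1 := by
      have h1 : t.count c = t.length :=
        List.count_eq_length.mpr (by intro b hb; simp [hallt b hb])
      have h2 : r.count c = 0 := List.count_eq_zero_of_not_mem hcr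
      rw [← htr]
      simp [List.count_append, h1, h2]
    have hcountk : ∀ k, k ≠ c → (c :: rest).count k = r.count k := by
      intro k hk
      have h1 : t.count k = 0 :=
        List.count_eq_zero_of_not_mem (by intro hkt; exact hk (hallt k hkt))
      rw [← htr]
      simp [List.count_append, h1, Ne.symm hk]
    -- distinct chars
    have hperm : (PySem.Set.ofList (c :: rest)).Perm (c :: PySem.Set.ofList r) := by
      rw [List.perm_ext_iff_of_nodup (PySem.Set.nodup_ofList _)
        (by simp [List.nodup_cons, PySem.Set.nodup_ofList, PySem.Set.mem_ofList, hcr])]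
      intro a
      simp only [PySem.Set.mem_ofList, List.mem_cons]
      constructor
      · rintro (h | h)
        · exact Or.inl h
        · rw [← htr] at h
          rcases List.mem_append.mp h with h | h
          · exact Or.inl (hallt a h)
          · exact Or.inr h
      · rintro (h | h)
        · exact Or.inl h
        · exact Or.inr (by rw [← htr]; exact List.mem_append.mpr (Or.inr h))
    rw [pvCountRuns]
    rw [hperm.countP_eq]
    rw [List.countP_cons]
    have hcongr : (PySem.Set.ofList r).countP (fun k => (c :: rest).count k == 3)
        = (PySem.Set.ofList r).countP (fun k => r.count k == 3) := by
      apply List.countP_congr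
      intro k hk
      have hkne : k ≠ c := by
        intro h; exact hcr (h ▸ (PySem.Set.mem_ofList r k).mp hk)
      simp [hcountk k hkne]
    rw [hcongr, ih hrpair, hcountc]
    simp only [← ht]
    by_cases h3 : t.length = 2
    · simp [h3]; ring
    · simp [h3]

-- ===== VERDICT (by name: the statement is the Claim_ definition above) =====
theorem only_three_of_a_kind_spec : Claim_equal_only_three_of_a_kind := by
  intro numstr _
  unfold Spec_only_three_of_a_kind only_three_of_a_kind only_three_of_a_kind_alt
  set l := numstr.toList with hl
  set s := PySem.List.sorted l (fun x => x) false with hs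
  have hsp : s.Perm l := PySem.List.sorted_perm l _ _
  have hNeq : ((PySem.Set.ofList l).countP (fun k => l.count k == 3))
      = ((PySem.Set.ofList s).countP (fun k => s.count k == 3)) := by
    have hmemperm : (PySem.Set.ofList l).Perm (PySem.Set.ofList s) := by
      rw [List.perm_ext_iff_of_nodup (PySem.Set.nodup_ofList _) (PySem.Set.nodup_ofList _)]
      intro a
      simp only [PySem.Set.mem_ofList]
      exact ⟨fun h => hsp.mem_iff.mpr h, fun h => hsp.mem_iff.mp h⟩
    rw [hmemperm.countP_eq]
    apply List.countP_congr
    intro k _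
    simp [hsp.count_eq]
  simp only [pv_A_char]
  rw [pv_runs_char s (PySem.List.sorted_pairwise l (fun x => x)), ← hNeq]
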